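-- pv_equiv track=rewrite | github.com/RADobson/doppeldown | ml/src/transformer_threat_detector.py | _check_transposition
-- ===== SOURCE A (Python) =====
-- def _check_transposition(domain: str, brand: str) -> bool:
--     """Check if domain has adjacent characters transposed."""
--     if len(domain) != len(brand):
--         return False
--
--     for i in range(len(brand) - 1):
--         test = brand[:i] + brand[i+1] + brand[i] + brand[i+2:]
--         if test == domain:
--             return True
--     return False
-- ===== SOURCE B (Python) =====
-- def _check_transposition(domain: str, brand: str) -> bool:
--     if len(domain) != len(brand):
--         return False
--     diffs = [i for i in range(len(domain)) if domain[i] != brand[i]]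
--     if not diffs:
--         # domain == brand: a swap of an equal adjacent pair reproduces brand
--         return any(brand[i] == brand[i + 1] for i in range(len(brand) - 1))
--     if len(diffs) == 2:
--         i, j = diffs
--         return j == i + 1 and domain[i] == brand[j] and domain[j] == brand[i]
--     return False
-- ===== Notes on version B (the rewrite author's own statement) =====
-- stated objective: faster
-- what changed: A tries every adjacent swap of brand and rebuilds/compares a full-length candidate string for each position; B makes a single pass collecting the indices where domain and brand differ and decides directly from that list's shape (empty: look for an adjacent equal pair; exactly two adjacent indices: check the characters are swapped).
import Mathlib
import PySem

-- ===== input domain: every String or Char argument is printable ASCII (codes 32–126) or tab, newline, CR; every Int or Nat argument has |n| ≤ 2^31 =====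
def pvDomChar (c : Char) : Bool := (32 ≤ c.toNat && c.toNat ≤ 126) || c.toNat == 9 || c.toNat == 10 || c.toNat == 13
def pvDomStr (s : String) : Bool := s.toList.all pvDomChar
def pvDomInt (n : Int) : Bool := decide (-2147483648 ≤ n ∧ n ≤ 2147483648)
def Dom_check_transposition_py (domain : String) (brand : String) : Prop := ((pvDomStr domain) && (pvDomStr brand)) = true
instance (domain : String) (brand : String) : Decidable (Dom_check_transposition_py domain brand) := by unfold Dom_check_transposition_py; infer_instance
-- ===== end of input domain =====

-- B replaces A's quadratic scan over all adjacent swaps of `brand` by a single pass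
-- collecting the differing indices (objective: faster).

-- ===== PORT A =====
-- A's body on the character lists: for each i in range(len(brand)-1) build
-- brand[:i] + brand[i+1] + brand[i] + brand[i+2:] and compare it with domain.
def checkA (d b : List Char) : Bool :=
  if d.length ≠ b.length then false
  else
    (PySem.List.pyRange 0 ((b.length : Int) - 1) 1).any (fun i =>
      match PySem.List.pyGet? b (i + 1), PySem.List.pyGet? b i with
      | some c1, some c0 =>
          (PySem.List.slice b none (some i) ++ [c1, c0]
             ++ PySem.List.slice b (some (i + 2)) none) == d
      | _, _ => false)

def check_transposition_py (domain : String) (brand : String) : Bool :=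
  checkA domain.toList brand.toList

-- ===== PORT B =====
-- B's body: one pass collects the indices where domain and brand differ,
-- then decides by the shape of that list.
def checkB (d b : List Char) : Bool :=
  if d.length ≠ b.length then false
  else
    let diffs := (PySem.List.pyRange 0 (d.length : Int) 1).filter
      (fun i => PySem.List.pyGet? d i != PySem.List.pyGet? b i)
    if diffs = [] then
      (PySem.List.pyRange 0 ((b.length : Int) - 1) 1).any
        (fun i => PySem.List.pyGet? b i == PySem.List.pyGet? b (i + 1))
    else if diffs.length = 2 then
      match diffs with
      | [i, j] => j == i + 1
          && PySem.List.pyGet? d i == PySem.List.pyGet? b j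
          && PySem.List.pyGet? d j == PySem.List.pyGet? b i
      | _ => false
    else false

def check_transposition_py_alt (domain : String) (brand : String) : Bool :=
  checkB domain.toList brand.toList

-- ===== PRECONDITION & SPEC =====
def Spec_check_transposition_py (domain : String) (brand : String) (out : Bool) : Prop := out = check_transposition_py_alt domain brand
instance (domain : String) (brand : String) (out : Bool) : Decidable (Spec_check_transposition_py domain brand out) := by unfold Spec_check_transposition_py; infer_instance

-- ===== CLAIM (what is proved, stated in full; the proofs are below) =====
def Claim_equal_check_transposition_py : Prop := ∀ (domain : String) (brand : String), Dom_check_transposition_py domain brand → Spec_check_transposition_py domain brand (check_transposition_py domain brand)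

-- ===== LEMMAS AND PROOFS =====

def hz (x p : Char) (d b : List Char) : Bool :=
  match d, b with
  | y :: d', q :: b' => q == x && (p == y && b' == d')
  | _, _ => false

def tw : List Char → List Char → Bool
  | x :: d, p :: b => hz x p d b || (x == p && tw d b)
  | _, _ => false

def adjRec : List Char → Bool
  | x :: y :: t => (x == y) || adjRec (y :: t)
  | _ => false

def hitA (d b : List Char) (k : Nat) : Bool :=
  match b[k+1]?, b[k]? with
  | some c1, some c0 => (b.take k ++ [c1, c0] ++ b.drop (k + 2)) == d
  | _, _ => false

def diffsN (d b : List Char) : List Nat :=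
  (List.range d.length).filter (fun k => d[k]? != b[k]?)

def adjAny (b : List Char) : Bool :=
  (List.range (b.length - 1)).any (fun k => b[k]? == b[k+1]?)

def natB (d b : List Char) : Bool :=
  if diffsN d b = [] then adjAny b
  else if (diffsN d b).length = 2 then
    match diffsN d b with
    | [i, j] => (j == i + 1) && (d[i]? == b[j]?) && (d[j]? == b[i]?)
    | _ => false
  else false


theorem diffsN_cons (x p : Char) (d b : List Char) :
    diffsN (x :: d) (p :: b)
      = (if x = p then [] else [0]) ++ (diffsN d b).map (· + 1) := by
  unfold diffsN
  rw [List.length_cons, List.range_succ_eq_map, List.filter_cons, List.filter_map]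
  by_cases hxp : x = p
  · simp [hxp, Function.comp_def]
  · simp [hxp, Function.comp_def]

theorem diffs_nil : ∀ (d b : List Char), d.length = b.length →
    (diffsN d b = [] ↔ d = b) := by
  intro d
  induction d with
  | nil =>
    intro b h
    have : b = [] := (List.eq_nil_of_length_eq_zero h.symm)
    subst this; simp [diffsN]
  | cons x d' ih =>
    intro b h
    match b with
    | [] => simp at h
    | p :: b' =>
      rw [diffsN_cons]
      by_cases hxp : x = p
      · simp [hxp, ih b' (by simpa using h)]
      · simp [hxp]

theorem adjAny_eq_adjRec : ∀ (b : List Char), adjAny b = adjRec b := by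
  intro b
  induction b with
  | nil => simp [adjAny, adjRec]
  | cons p b' ih =>
    match b' with
    | [] => simp [adjAny, adjRec]
    | q :: b'' =>
      unfold adjAny
      rw [show (p :: q :: b'').length - 1 = b''.length + 1 from by simp,
        List.range_succ_eq_map, List.any_cons, List.any_map]
      simp only [Function.comp_def, Nat.succ_eq_add_one, List.getElem?_cons_succ,
        List.getElem?_cons_zero]
      unfold adjAny at ih
      simp only [List.length_cons, Nat.add_sub_cancel, List.getElem?_cons_succ] at ih
      rw [ih]
      show _ = ((p == q) || adjRec (q :: b''))
      simp

theorem tw_self : ∀ (d : List Char), tw d d = adjRec d := by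
  intro d
  induction d with
  | nil => simp [tw, adjRec]
  | cons x d' ih =>
    match d' with
    | [] => simp [tw, hz, adjRec]
    | y :: d'' =>
      show (hz x x (y :: d'') (y :: d'') || (x == x && tw (y :: d'') (y :: d'')))
        = ((x == y) || adjRec (y :: d''))
      rw [ih]
      by_cases hxy : x = y
      · simp [hz, hxy]
      · rw [show (hz x x (y :: d'') (y :: d'')) = (y == x && (x == y && (d'' == d'')))
            from rfl,
          show ((y : Char) == x) = false from beq_eq_false_iff_ne.mpr (Ne.symm hxy),
          show ((x : Char) == y) = false from beq_eq_false_iff_ne.mpr hxy]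
        simp

theorem hz_true_imp (x p : Char) (d b : List Char) (h : hz x p d b = true) :
    ∃ y q t, d = y :: t ∧ b = q :: t ∧ q = x ∧ p = y := by
  match d, b with
  | [], _ => simp [hz] at h
  | _ :: _, [] => simp [hz] at h
  | y :: d', q :: b' =>
    simp only [hz, Bool.and_eq_true, beq_iff_eq] at h
    exact ⟨y, q, d', rfl, by rw [h.2.2], h.1, h.2.1⟩

theorem natB_eq_tw : ∀ (b d : List Char), d.length = b.length → natB d b = tw d b := by
  intro b
  induction b with
  | nil =>
    intro d h
    have : d = [] := List.eq_nil_of_length_eq_zero h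
    subst this
    simp [natB, diffsN, adjAny, tw]
  | cons p b' ih =>
    intro d h
    rcases d with _ | ⟨x, d'⟩
    · simp at h
    · have hlen : d'.length = b'.length := by simpa using h
      by_cases hxp : x = p
      · subst hxp
        by_cases hM : diffsN d' b' = []
        · have hdb : d' = b' := (diffs_nil d' b' hlen).mp hM
          subst hdb
          have hDn : diffsN (x :: d') (x :: d') = [] := by
            rw [diffsN_cons]; simp [hM]
          unfold natB
          rw [if_pos hDn, adjAny_eq_adjRec, ← tw_self]
        · have hzf : hz x x d' b' = false := by
            cases hhz : hz x x d' b' with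
            | false => rfl
            | true =>
              obtain ⟨y, q, t, hd, hb, hq, hp⟩ := hz_true_imp _ _ _ _ hhz
              exact absurd ((diffs_nil _ _ hlen).mpr
                (by rw [hd, hb, hq, ← hp])) hM
          have htw : tw (x :: d') (x :: b') = tw d' b' := by
            show (hz x x d' b' || (x == x && tw d' b')) = tw d' b'
            rw [hzf]; simp
          rw [htw, ← ih d' hlen]
          have hD : diffsN (x :: d') (x :: b') = (diffsN d' b').map (· + 1) := by
            rw [diffsN_cons]; simp
          rcases hM' : diffsN d' b' with _ | ⟨a, _ | ⟨c, _ | ⟨e, rest⟩⟩⟩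
          · exact absurd hM' hM
          · unfold natB
            rw [hD, hM']
            simp
          · unfold natB
            rw [hD, hM']
            have h12 : ((c + 1 : Nat) == a + 1 + 1) = ((c : Nat) == a + 1) := by
              simp
            simp only [List.map_cons, List.map_nil, List.getElem?_cons_succ, h12]
            rw [if_neg (show ¬([a+1, c+1] : List Nat) = [] by simp),
              if_neg (show ¬([a, c] : List Nat) = [] by simp),
              if_pos (show ([a+1, c+1] : List Nat).length = 2 by simp),
              if_pos (show ([a, c] : List Nat).length = 2 by simp)]
          · unfold natB
            rw [hD, hM']
            simp
      · have htw : tw (x :: d') (p :: b') = hz x p d' b' := by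
          show (hz x p d' b' || (x == p && tw d' b')) = hz x p d' b'
          rw [beq_eq_false_iff_ne.mpr hxp]; simp
        rw [htw]
        have hD : diffsN (x :: d') (p :: b') = 0 :: (diffsN d' b').map (· + 1) := by
          rw [diffsN_cons]; simp [hxp]
        rcases hM' : diffsN d' b' with _ | ⟨a, _ | ⟨c, rest⟩⟩
        · -- tails identical
          have hdb : d' = b' := (diffs_nil d' b' hlen).mp hM'
          subst hdb
          have hzf : hz x p d' d' = false := by
            cases hhz : hz x p d' d' with
            | false => rfl
            | true =>
              obtain ⟨y, q, t, hd, hb, hq, hp⟩ := hz_true_imp _ _ _ _ hhz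
              have hyq : y = q := by rw [hd] at hb; exact (List.cons_eq_cons.mp hb).1
              exact absurd ((hp.trans (hyq.trans hq)).symm) hxp
          rw [hzf]
          unfold natB
          rw [hD, hM']
          simp
        · -- exactly one differing index in the tails
          rcases d' with _ | ⟨y, d''⟩
          · simp [diffsN] at hM'
          · rcases b' with _ | ⟨q, b''⟩
            · simp at hlen
            · have hM2 := hM'
              rw [diffsN_cons] at hM2
              by_cases hyq : y = q
              · rw [if_pos hyq, List.nil_append] at hM2
                rcases hN : diffsN d'' b'' with _ | ⟨w, N'⟩
                · rw [hN] at hM2; simp at hM2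
                · rw [hN] at hM2
                  simp only [List.map_cons, List.cons.injEq] at hM2
                  have ha : a = w + 1 := hM2.1.symm
                  have hzf : hz x p (y :: d'') (q :: b'') = false := by
                    show (q == x && (p == y && b'' == d'')) = false
                    by_cases hqx : q = x
                    · by_cases hpy : p = y
                      · exact absurd (hpy.trans (hyq.trans hqx)).symm hxp
                      · simp [hpy]
                    · simp [hqx]
                  rw [hzf]
                  unfold natB
                  rw [hD, hM']
                  simp [ha]
              · rw [if_neg hyq, List.cons_append, List.nil_append] at hM2
                have ha : a = 0 := (List.cons_eq_cons.mp hM2).1.symm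
                have hN : diffsN d'' b'' = [] := by
                  have := (List.cons_eq_cons.mp hM2).2
                  simpa using this.symm
                have hdb : d'' = b'' :=
                  (diffs_nil d'' b'' (by simpa using hlen)).mp hN
                subst hdb
                unfold natB
                rw [hD, hM', ha]
                simp only [List.map_cons, List.map_nil, List.getElem?_cons_succ,
                  List.getElem?_cons_zero]
                show (((0 + 1 == 0 + 1) && (some x == some q)) && (some y == some p))
                    = hz x p (y :: d'') (q :: d'')
                have h1 : (some x == some q) = (q == x) := by
                  simp [Bool.beq_comm]
                have h2 : (some y == some p) = (p == y) := by
                  simp [Bool.beq_comm]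
                rw [h1, h2]
                show ((true && (q == x)) && (p == y)) = hz x p (y :: d'') (q :: d'')
                simp [hz]
        · -- two or more differing indices in the tails
          have hzf : hz x p d' b' = false := by
            cases hhz : hz x p d' b' with
            | false => rfl
            | true =>
              obtain ⟨y, q, t, hd, hb, hq, hp⟩ := hz_true_imp _ _ _ _ hhz
              exfalso
              rw [hd, hb, diffsN_cons, (diffs_nil t t rfl).mpr rfl] at hM'
              by_cases hyq' : y = q <;> simp [hyq'] at hM'
          rw [hzf]
          unfold natB
          rw [hD, hM']
          simp

theorem adjloop_eq (b : List Char) :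
    ((PySem.List.pyRange 0 ((b.length : Int) - 1) 1).any
      (fun i => PySem.List.pyGet? b i == PySem.List.pyGet? b (i + 1))) = adjAny b := by
  unfold adjAny
  cases hb : b.length with
  | zero =>
    simp only [Nat.cast_zero]
    have h0 : PySem.List.pyRange 0 ((0 : Int) - 1) 1 = [] := by decide
    rw [h0]
    simp
  | succ m =>
    rw [show ((m + 1 : Nat) : Int) - 1 = (m : Int) from by push_cast; ring,
      PySem.List.pyRange_zero_natCast, List.any_map,
      show m + 1 - 1 = m from rfl]
    apply PySem.List.any_congr_mem
    intro k _
    have h1 : ((k : Int) + 1) = ((k + 1 : Nat) : Int) := by push_cast; ring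
    simp only [Function.comp_def, h1, PySem.List.pyGet?_natCast]

theorem checkB_eq (d b : List Char) (h : d.length = b.length) :
    checkB d b = natB d b := by
  unfold checkB natB
  rw [if_neg (by omega), PySem.List.pyRange_zero_natCast, List.filter_map]
  simp only [Function.comp_def]
  have hfilter : (List.range d.length).filter
      (fun k : Nat => PySem.List.pyGet? d ((k : Int)) != PySem.List.pyGet? b ((k : Int)))
      = diffsN d b := by
    unfold diffsN
    apply List.filter_congr
    intro k _
    simp
  rw [hfilter]
  rcases hM : diffsN d b with _ | ⟨a, _ | ⟨c, _ | ⟨e, rest⟩⟩⟩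
  · rw [adjloop_eq]
    simp
  · simp
  · simp only [List.map_cons, List.map_nil]
    have hcond : (((c : Int)) == ((a : Int)) + 1) = ((c : Nat) == a + 1) := by
      by_cases hc : c = a + 1
      · simp [hc]
      · have hne : ((c : Int)) ≠ ((a : Int)) + 1 := by
          intro hh
          apply hc
          omega
        simp [hc, hne]
    simp [hcond]
  · simp

theorem checkA_eq (d b : List Char) (h : d.length = b.length) :
    checkA d b = (List.range (b.length - 1)).any (hitA d b) := by
  unfold checkA
  rw [if_neg (by omega)]
  cases hb : b.length with
  | zero => simp [PySem.List.pyRange]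
  | succ m =>
    have : ((m + 1 : Nat) : Int) - 1 = (m : Int) := by push_cast; ring
    rw [this, PySem.List.pyRange_zero_natCast, List.any_map,
      show m + 1 - 1 = m from rfl]
    apply PySem.List.any_congr_mem
    intro k _
    have h1 : ((k : Int) + 1) = ((k + 1 : Nat) : Int) := by push_cast; ring
    have h2 : ((k : Int) + 2) = ((k + 2 : Nat) : Int) := by push_cast; ring
    simp only [Function.comp, h1, h2, PySem.List.pyGet?_natCast,
      PySem.List.slice_to_natCast, PySem.List.slice_from_natCast, hitA]

theorem any_and (l : List Nat) (c : Bool) (f : Nat → Bool) :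
    (l.any fun k => c && f k) = (c && l.any f) := by
  cases c <;> simp

theorem anyA_eq_tw : ∀ (b d : List Char), d.length = b.length →
    (List.range (b.length - 1)).any (hitA d b) = tw d b := by
  intro b
  induction b with
  | nil =>
    intro d h
    have : d = [] := List.eq_nil_of_length_eq_zero h
    subst this; simp [tw]
  | cons p b' ih =>
    intro d h
    match d with
    | [] => simp at h
    | x :: d' =>
      match b' with
      | [] =>
        have : d' = [] := List.eq_nil_of_length_eq_zero (by simpa using h)
        subst this; simp [tw, hz]
      | q :: b'' =>
        match d' with
        | [] => simp at h
        | y :: d'' =>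
          have hlen : (y :: d'').length = (q :: b'').length := by simpa using h
          rw [show (p :: q :: b'').length - 1 = b''.length + 1 from by simp,
            List.range_succ_eq_map, List.any_cons, List.any_map]
          have h0 : hitA (x :: y :: d'') (p :: q :: b'') 0
              = hz x p (y :: d'') (q :: b'') := by
            simp only [hitA, hz, List.getElem?_cons_succ, List.getElem?_cons_zero,
              List.take_zero, List.drop_succ_cons, List.drop_zero, List.nil_append,
              List.cons_append, List.cons_beq_cons]
          have hshift : ∀ k, hitA (x :: y :: d'') (p :: q :: b'') (k + 1)
              = ((x == p) && hitA (y :: d'') (q :: b'') k) := by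
            intro k
            simp only [hitA]
            cases h1 : (q :: b'')[k+1]? with
            | none => simp [List.getElem?_cons_succ, h1]
            | some c1 =>
              cases h2 : (q :: b'')[k]? with
              | none =>
                exfalso
                have hk1 : k + 1 < (q :: b'').length :=
                  (List.getElem?_eq_some_iff.mp h1).1
                have hk2 : (q :: b'').length ≤ k := List.getElem?_eq_none_iff.mp h2
                omega
              | some c2 =>
                simp only [List.getElem?_cons_succ, h1, h2, List.take_succ_cons,
                  List.drop_succ_cons, List.cons_append, List.cons_beq_cons]
                rw [Bool.beq_comm]
          simp only [Function.comp_def, Nat.succ_eq_add_one]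
          rw [h0, PySem.List.any_congr_mem (fun k _ => hshift k), any_and]
          have hih := ih (y :: d'') hlen
          simp only [List.length_cons, Nat.add_sub_cancel] at hih
          rw [hih]
          rfl

theorem checkA_eq_checkB (d b : List Char) : checkA d b = checkB d b := by
  by_cases h : d.length = b.length
  · rw [checkA_eq d b h, checkB_eq d b h, anyA_eq_tw b d h, natB_eq_tw b d h]
  · unfold checkA checkB
    rw [if_pos h, if_pos h]

-- ===== VERDICT (by name: the statement is the Claim_ definition above) =====
theorem check_transposition_py_spec : Claim_equal_check_transposition_py := by
  intro domain brand _
  unfold Spec_check_transposition_py check_transposition_py check_transposition_py_alt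
  exact checkA_eq_checkB domain.toList brand.toList
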